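-- pv_equiv track=rewrite | github.com/Mireutale/Algorithm | Baekjoon/Barkingdog/11.재귀/BOJ_14956/14956_Philosopher's Walk.py | Philosophers_walk
-- ===== SOURCE A (Python) =====
-- def Philosophers_walk(n, m):
--     # Base case: n == 2일 때 직접 좌표 반환
--     if n == 2:
--         move = [(1, 1), (1, 2), (2, 2), (2, 1)]
--         return move[m - 1]
--
--     side = n // 2
--     area = side**2
--
--     if m <= area:
--         x, y = Philosophers_walk(side, m)
--         return (y, x)
--     elif m <= 2 * area:
--         x, y = Philosophers_walk(side, m - area)
--         return (x, y + side)
--     elif m <= 3 * area: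
--         x, y = Philosophers_walk(side, m - 2 * area)
--         return (x + side, y + side)
--     else:
--         x, y = Philosophers_walk(side, m - 3 * area)
--         return (2 * side - y + 1, side - x + 1)
-- ===== SOURCE B (Python) =====
-- def Philosophers_walk(n, m):
--     # Iterative two-phase version: descend with an explicit stack of
--     # (side, quadrant) choices, then unwind it applying the transforms.
--     moves = [(1, 1), (1, 2), (2, 2), (2, 1)]
--     stack = []
--     while n != 2:
--         if n < 2:
--             raise ValueError("halving the grid size never reaches 2")
--         side = n // 2
--         area = side * side
--         if m <= area:
--             q = 0
--         elif m <= 2 * area: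
--             q = 1
--         elif m <= 3 * area:
--             q = 2
--         else:
--             q = 3
--         stack.append((side, q))
--         m -= q * area
--         n = side
--     x, y = moves[m - 1]
--     while stack:
--         side, q = stack.pop()
--         if q == 0:
--             x, y = y, x
--         elif q == 1:
--             y += side
--         elif q == 2:
--             x, y = x + side, y + side
--         else:
--             x, y = 2 * side - y + 1, side - x + 1
--     return (x, y)
-- ===== Notes on version B (the rewrite author's own statement) =====
-- stated objective: alternative
-- what changed: Replaces A's recursion (transform applied on the way out of each recursive call) with an iterative two-phase loop: descend halving n while pushing (side, quadrant) choices on an explicit stack, then unwind the stack applying the transforms.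
import Mathlib
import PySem

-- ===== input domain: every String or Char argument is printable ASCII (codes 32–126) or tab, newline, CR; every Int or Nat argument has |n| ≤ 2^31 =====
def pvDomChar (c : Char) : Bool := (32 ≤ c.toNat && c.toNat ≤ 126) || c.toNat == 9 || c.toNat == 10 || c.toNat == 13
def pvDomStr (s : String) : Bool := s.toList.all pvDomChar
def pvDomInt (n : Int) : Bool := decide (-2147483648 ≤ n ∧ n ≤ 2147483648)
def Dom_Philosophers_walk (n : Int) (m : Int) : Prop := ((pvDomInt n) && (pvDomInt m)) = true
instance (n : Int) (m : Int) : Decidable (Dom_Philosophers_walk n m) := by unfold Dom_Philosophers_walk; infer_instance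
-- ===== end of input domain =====

-- B replaces A's recursion by an iterative two-phase loop: descend recording (side, quadrant)
-- choices on an explicit stack, then unwind the stack applying the transforms (alternative
-- decomposition, same cost).

-- ===== PORT A =====
-- the literal `move` table of A's base case (also Source B's `moves` literal)
def pwMove : List (Int × Int) := [(1, 1), (1, 2), (2, 2), (2, 1)]

-- recursion of A; the fuel (bit length of n, enough for the halving chain) only pads termination
def PWa : Nat → Int → Int → Int × Int
  | 0, _, _ => (0, 0)
  | fuel + 1, n, m =>
    if n = 2 then
      (PySem.List.pyGet? pwMove (m - 1)).getD (0, 0)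
    else
      let side := PySem.Int.floordiv n 2
      let area := side ^ 2
      if m ≤ area then
        let p := PWa fuel side m
        (p.2, p.1)
      else if m ≤ 2 * area then
        let p := PWa fuel side (m - area)
        (p.1, p.2 + side)
      else if m ≤ 3 * area then
        let p := PWa fuel side (m - 2 * area)
        (p.1 + side, p.2 + side)
      else
        let p := PWa fuel side (m - 3 * area)
        (2 * side - p.2 + 1, side - p.1 + 1)

def Philosophers_walk (n : Int) (m : Int) : Int × Int := PWa (PySem.Int.bitLength n) n m

-- ===== PORT B =====
-- Source B's first loop (`while n != 2`): push (side, quadrant) and shift m; on Pre_ the loop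
-- halves n down to exactly 2, so the fuel (bit length of n) only pads termination.
-- The Python stack (append / pop at the right end) is represented head-first: push = cons,
-- pop = head, which is the same LIFO order.
def PWbDesc : Nat → Int → Int → List (Int × Int) → Int × List (Int × Int)
  | 0, _, m, st => (m, st)
  | fuel + 1, n, m, st =>
    if n ≠ 2 then
      -- Python B raises ValueError when n < 2 (outside Pre_); the port stops with the state
      if n < 2 then (m, st)
      else
      let side := PySem.Int.floordiv n 2
      let area := side * side
      let q : Int := if m ≤ area then 0 else if m ≤ 2 * area then 1 else if m ≤ 3 * area then 2 else 3
      PWbDesc fuel side (m - q * area) ((side, q) :: st)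
    else (m, st)

-- Source B's second loop (`while stack`): pop and apply the level's transform
def PWbPop : List (Int × Int) → Int → Int → Int × Int
  | [], x, y => (x, y)
  | (side, q) :: st, x, y =>
    if q = 0 then PWbPop st y x
    else if q = 1 then PWbPop st x (y + side)
    else if q = 2 then PWbPop st (x + side) (y + side)
    else PWbPop st (2 * side - y + 1) (side - x + 1)

def Philosophers_walk_alt (n : Int) (m : Int) : Int × Int :=
  let r := PWbDesc (PySem.Int.bitLength n) n m []
  let p := (PySem.List.pyGet? pwMove (r.1 - 1)).getD (0, 0)
  PWbPop r.2 p.1 p.2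

-- ===== PRECONDITION & SPEC =====
-- pwDigitsOK j n M checks that the mixed-radix "quadrant digits" of M in the radices
-- (n//2)², (n//4)², …, 4 are all ≤ 3, with a final remainder ≤ 3: exactly the positions
-- that exist on the n×n grid.  (Here n > 0 on every use, so Lean's `/` `%` are Python's.)
def pwDigitsOK : Nat → Int → Int → Bool
  | 0, _, M => decide (0 ≤ M ∧ M ≤ 3)
  | j + 1, n, M =>
    let a := (n / 2) ^ 2
    decide (M / a ≤ 3) && pwDigitsOK j (n / 2) (M % a)

-- EXACTLY the inputs on which the Python A returns: repeated halving of n must reach 2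
-- (∃ j, 2·2^j ≤ n < 3·2^j; otherwise A recurses forever), and m must name an existing cell:
-- -3 ≤ m ≤ 0 (Python's negative indexing into the base table) or m ≥ 1 with all quadrant
-- digits of m−1 in 0..3 (otherwise the base lookup raises IndexError).  The bound j < 32 is
-- implied by Dom's |n| ≤ 2^31 (it forces j ≤ 30), so it excludes nothing inside Dom.
def Pre_Philosophers_walk (n : Int) (m : Int) : Prop :=
  ∃ j ∈ Finset.range 32,
    (2 * 2 ^ j ≤ n ∧ n < 3 * 2 ^ j) ∧ -3 ≤ m ∧ (m ≤ 0 ∨ pwDigitsOK j n (m - 1) = true)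

instance (n : Int) (m : Int) : Decidable (Pre_Philosophers_walk n m) := by
  unfold Pre_Philosophers_walk; infer_instance

def pvWitness_Philosophers_walk : Int × Int := (4, 7)

def Spec_Philosophers_walk (n : Int) (m : Int) (out : Int × Int) : Prop := out = Philosophers_walk_alt n m
instance (n : Int) (m : Int) (out : Int × Int) : Decidable (Spec_Philosophers_walk n m out) := by unfold Spec_Philosophers_walk; infer_instance

-- ===== CLAIM (what is proved, stated in full; the proofs are below) =====
def Claim_equal_Philosophers_walk : Prop := ∀ (n : Int) (m : Int), Dom_Philosophers_walk n m → Pre_Philosophers_walk n m → Spec_Philosophers_walk n m (Philosophers_walk n m)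

-- ===== LEMMAS AND PROOFS =====

-- THE BRIDGE: descending j levels and unwinding the stack computes, level by level,
-- exactly the transform A applies on the way out of its recursion (no condition on m needed).
lemma PW_bridge (j : Nat) : ∀ (fa fb : Nat) (n m : Int) (st : List (Int × Int)),
    2 * 2 ^ j ≤ n → n < 3 * 2 ^ j → j + 1 ≤ fa → j ≤ fb →
    PWbPop (PWbDesc fb n m st).2
        ((PySem.List.pyGet? pwMove ((PWbDesc fb n m st).1 - 1)).getD (0, 0)).1
        ((PySem.List.pyGet? pwMove ((PWbDesc fb n m st).1 - 1)).getD (0, 0)).2 =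
      PWbPop st (PWa fa n m).1 (PWa fa n m).2 := by
  induction j with
  | zero =>
    intro fa fb n m st hlo hhi hfa _
    obtain ⟨a, rfl⟩ : ∃ a, fa = a + 1 := ⟨fa - 1, by omega⟩
    have hn2 : n = 2 := by norm_num at hlo hhi; omega
    subst hn2
    have hdesc : PWbDesc fb 2 m st = (m, st) := by
      cases fb <;> simp [PWbDesc]
    rw [hdesc]
    simp [PWa]
  | succ j ih =>
    intro fa fb n m st hlo hhi hfa hfb
    obtain ⟨a, rfl⟩ : ∃ a, fa = a + 1 := ⟨fa - 1, by omega⟩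
    obtain ⟨b, rfl⟩ : ∃ b, fb = b + 1 := ⟨fb - 1, by omega⟩
    have hc : (0:Int) < 2 ^ j := by positivity
    have hp : ((2:Int) ^ (j + 1)) = 2 * 2 ^ j := by ring
    rw [hp] at hlo hhi
    have hne2 : n ≠ 2 := by omega
    have hside : PySem.Int.floordiv n 2 = n / 2 :=
      PySem.Int.floordiv_eq_ediv_of_pos (by norm_num)
    have hslo : 2 * 2 ^ j ≤ n / 2 := by omega
    have hshi : n / 2 < 3 * 2 ^ j := by omega
    -- unfold one level of both programs
    have hnlt : ¬ n < 2 := by omega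
    simp only [PWa, PWbDesc, hside, ne_eq, hne2, not_false_eq_true, if_true, if_false, if_neg hnlt]
    have hsq : (n / 2) ^ 2 = (n / 2) * (n / 2) := by ring
    rw [hsq]
    by_cases h1 : m ≤ (n / 2) * (n / 2)
    · rw [if_pos h1, if_pos h1]
      simp only [zero_mul, sub_zero]
      rw [ih a b (n / 2) m ((n / 2, 0) :: st) hslo hshi (by omega) (by omega)]
      simp [PWbPop]
    · rw [if_neg h1, if_neg h1]
      by_cases h2 : m ≤ 2 * ((n / 2) * (n / 2))
      · rw [if_pos h2, if_pos h2]
        simp only [one_mul]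
        rw [ih a b (n / 2) (m - (n / 2) * (n / 2)) ((n / 2, 1) :: st) hslo hshi
          (by omega) (by omega)]
        simp [PWbPop]
      · rw [if_neg h2, if_neg h2]
        by_cases h3 : m ≤ 3 * ((n / 2) * (n / 2))
        · rw [if_pos h3, if_pos h3]
          rw [ih a b (n / 2) (m - 2 * ((n / 2) * (n / 2))) ((n / 2, 2) :: st) hslo hshi
            (by omega) (by omega)]
          simp [PWbPop]
        · rw [if_neg h3, if_neg h3]
          rw [ih a b (n / 2) (m - 3 * ((n / 2) * (n / 2))) ((n / 2, 3) :: st) hslo hshi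
            (by omega) (by omega)]
          simp [PWbPop]

-- ===== VERDICT (by name: the statement is the Claim_ definition above) =====
theorem Philosophers_walk_spec : Claim_equal_Philosophers_walk := by
  intro n m _ hpre
  obtain ⟨j, _, ⟨hlo, hhi⟩, _⟩ := hpre
  unfold Spec_Philosophers_walk Philosophers_walk Philosophers_walk_alt
  have hfuel : j + 1 ≤ PySem.Int.bitLength n := by
    have h1 : ((2 ^ (j + 1) : Nat) : Int) ≤ n := by
      push_cast
      calc (2:Int) ^ (j + 1) = 2 * 2 ^ j := by ring
      _ ≤ n := hlo
    have h2 : 2 ^ (j + 1) ≤ n.natAbs := by omega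
    have h3 : n.natAbs < 2 ^ PySem.Int.bitLength n := PySem.Int.lt_two_pow_bitLength n
    have h4 : (2:Nat) ^ (j + 1) < 2 ^ PySem.Int.bitLength n := lt_of_le_of_lt h2 h3
    have := (Nat.pow_lt_pow_iff_right (by norm_num : 1 < 2)).mp h4
    omega
  exact (PW_bridge j (PySem.Int.bitLength n) (PySem.Int.bitLength n) n m [] hlo hhi hfuel
    (by omega)).symm
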